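-- pv_equiv track=rewrite | github.com/vigneshsabapathi/python-algorithms | maths/allocation_number_optimized.py | allocation_num_tuples
-- ===== SOURCE A (Python) =====
-- def allocation_num_tuples(number_of_bytes: int, partitions: int) -> list[tuple[int, int]]:
--     """
--     >>> allocation_num_tuples(10, 2)
--     [(1, 5), (6, 10)]
--     """
--     if partitions <= 0 or partitions > number_of_bytes:
--         raise ValueError("bad partitions")
--     per = number_of_bytes // partitions
--     out = []
--     for i in range(partitions):
--         s = i * per + 1
--         e = number_of_bytes if i == partitions - 1 else (i + 1) * per
--         out.append((s, e))
--     return out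
-- ===== SOURCE B (Python) =====
-- def allocation_num_tuples(number_of_bytes: int, partitions: int) -> list[tuple[int, int]]:
--     if partitions <= 0 or partitions > number_of_bytes:
--         raise ValueError("bad partitions")
--     per = number_of_bytes // partitions
--     # cursor-threading: carry the running start boundary forward;
--     # the final partition is emitted once, after the loop, ending at number_of_bytes
--     out = []
--     start = 1
--     for _ in range(partitions - 1):
--         out.append((start, start + per - 1))
--         start += per
--     out.append((start, number_of_bytes))
--     return out
-- ===== Notes on version B (the rewrite author's own statement) =====
-- stated objective: alternative
-- what changed: Replaces the index-formula loop (each start/end derived as i*per+1 and (i+1)*per with an in-loop last-partition branch) by a cursor-threading loop that carries the running start boundary forward over the first partitions-1 chunks and emits the final (start, number_of_bytes) tuple once after the loop.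
import Mathlib
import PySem

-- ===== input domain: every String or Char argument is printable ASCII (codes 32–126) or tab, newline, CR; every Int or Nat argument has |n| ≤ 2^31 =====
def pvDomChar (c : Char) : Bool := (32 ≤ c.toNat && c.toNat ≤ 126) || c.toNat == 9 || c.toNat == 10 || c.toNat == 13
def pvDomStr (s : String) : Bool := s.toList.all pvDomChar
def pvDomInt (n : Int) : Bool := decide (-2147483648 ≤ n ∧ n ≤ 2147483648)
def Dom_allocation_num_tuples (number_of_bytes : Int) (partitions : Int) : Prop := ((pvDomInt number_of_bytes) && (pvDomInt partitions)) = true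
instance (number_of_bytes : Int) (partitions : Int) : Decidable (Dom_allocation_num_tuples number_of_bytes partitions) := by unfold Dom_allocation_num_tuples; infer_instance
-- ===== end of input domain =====

-- B replaces the index-formula loop by a recursive cursor-threading builder (same cost); return-value equivalence on Pre_.

-- ===== PORT A =====
def allocation_num_tuples (number_of_bytes : Int) (partitions : Int) : List (Int × Int) :=
  if partitions ≤ 0 ∨ partitions > number_of_bytes then []  -- Python raises ValueError here; excluded by Pre_
  else
    (PySem.List.pyRange 0 partitions 1).foldl
      (fun out i =>
        out ++ [(i * PySem.Int.floordiv number_of_bytes partitions + 1,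
                 if i == partitions - 1 then number_of_bytes
                 else (i + 1) * PySem.Int.floordiv number_of_bytes partitions)]) []

-- ===== PORT B =====
-- out.append((start, number_of_bytes)); return out  — the step after B's loop
def pvEmitLast (number_of_bytes : Int) (fin : List (Int × Int) × Int) : List (Int × Int) :=
  fin.1 ++ [(fin.2, number_of_bytes)]

def allocation_num_tuples_alt (number_of_bytes : Int) (partitions : Int) : List (Int × Int) :=
  if partitions ≤ 0 ∨ partitions > number_of_bytes then []  -- Python raises ValueError here; excluded by Pre_
  else
    pvEmitLast number_of_bytes
      ((PySem.List.pyRange 0 (partitions - 1) 1).foldl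
        (fun (acc : List (Int × Int) × Int) _ =>
          (acc.1 ++ [(acc.2, acc.2 + PySem.Int.floordiv number_of_bytes partitions - 1)],
           acc.2 + PySem.Int.floordiv number_of_bytes partitions)) ([], 1))

-- ===== PRECONDITION & SPEC =====
-- Pre_ excludes exactly the inputs on which A raises ValueError ("bad partitions").
def Pre_allocation_num_tuples (number_of_bytes : Int) (partitions : Int) : Prop :=
  0 < partitions ∧ partitions ≤ number_of_bytes
instance (number_of_bytes : Int) (partitions : Int) : Decidable (Pre_allocation_num_tuples number_of_bytes partitions) := by unfold Pre_allocation_num_tuples; infer_instance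
def pvWitness_allocation_num_tuples : Int × Int := (10, 2)

def Spec_allocation_num_tuples (number_of_bytes : Int) (partitions : Int) (out : List (Int × Int)) : Prop := out = allocation_num_tuples_alt number_of_bytes partitions
instance (number_of_bytes : Int) (partitions : Int) (out : List (Int × Int)) : Decidable (Spec_allocation_num_tuples number_of_bytes partitions out) := by unfold Spec_allocation_num_tuples; infer_instance

-- ===== CLAIM (what is proved, stated in full; the proofs are below) =====
def Claim_equal_allocation_num_tuples : Prop := ∀ (number_of_bytes : Int) (partitions : Int), Dom_allocation_num_tuples number_of_bytes partitions → Pre_allocation_num_tuples number_of_bytes partitions → Spec_allocation_num_tuples number_of_bytes partitions (allocation_num_tuples number_of_bytes partitions)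

-- ===== LEMMAS AND PROOFS =====

-- The append-fold of A is a map.
theorem pv_foldl_append_map {α β : Type} (g : α → β) :
    ∀ (l : List α) (init : List β),
      l.foldl (fun out i => out ++ [g i]) init = init ++ l.map g := by
  intro l
  induction l with
  | nil => intro init; simp
  | cons x xs ih => intro init; simp [List.foldl, ih]

-- B's cursor loop, characterised: after folding over any list, the accumulated
-- tuples are the index-formula chunks and the cursor sits past them.
theorem pv_cursor_fold (per : Int) :
    ∀ (l : List Int) (acc : List (Int × Int)) (s : Int),
      l.foldl (fun (a : List (Int × Int) × Int) _ =>
          (a.1 ++ [(a.2, a.2 + per - 1)], a.2 + per)) (acc, s) =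
        (acc ++ (List.range l.length).map
            (fun k : Nat => (s + (k : Int) * per, s + (k : Int) * per + per - 1)),
         s + (l.length : Int) * per) := by
  intro l
  induction l with
  | nil => intro acc s; simp
  | cons x xs ih =>
    intro acc s
    rw [List.foldl_cons, ih]
    simp only [List.length_cons, List.range_succ_eq_map, List.map_cons, List.map_map]
    rw [Prod.mk.injEq]
    refine ⟨?_, ?_⟩
    · rw [List.append_assoc]
      congr 1
      simp only [Nat.cast_zero, zero_mul, add_zero, List.singleton_append, List.cons.injEq]
      refine ⟨trivial, ?_⟩
      apply List.map_congr_left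
      intro k _
      simp only [Function.comp_apply, Nat.succ_eq_add_one, Prod.mk.injEq]
      push_cast
      constructor <;> ring
    · push_cast; ring

-- ===== VERDICT (by name: the statement is the Claim_ definition above) =====
theorem allocation_num_tuples_spec : Claim_equal_allocation_num_tuples := by
  intro nb p _ hpre
  obtain ⟨hp, hle⟩ := hpre
  unfold Spec_allocation_num_tuples allocation_num_tuples allocation_num_tuples_alt
  have hguard : ¬ (p ≤ 0 ∨ p > nb) := by omega
  rw [if_neg hguard, if_neg hguard]
  set per := PySem.Int.floordiv nb p with hper
  -- B side: run the cursor characterisation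
  rw [pvEmitLast, pv_cursor_fold per (PySem.List.pyRange 0 (p - 1) 1) [] 1]
  have hlen : (PySem.List.pyRange 0 (p - 1) 1).length = p.toNat - 1 := by
    rw [PySem.List.length_pyRange_one]; omega
  rw [hlen]
  -- A side: fold-with-append is a map over range p.toNat
  rw [pv_foldl_append_map, List.nil_append]
  have hA : PySem.List.pyRange 0 p 1 = (List.range p.toNat).map (fun k : Nat => (k : Int)) := by
    rw [PySem.List.pyRange_one]
    simp
  rw [hA, List.map_map]
  -- split A's range at its last index
  obtain ⟨n, hn⟩ : ∃ n, p.toNat = n + 1 := ⟨p.toNat - 1, by omega⟩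
  rw [hn, List.range_succ, List.map_append]
  have hn' : (n + 1 : Nat) - 1 = n := rfl
  rw [hn']
  congr 1
  · apply List.map_congr_left
    intro k hk
    have hklt : k < n := List.mem_range.mp hk
    have hne : ¬ (((k : Int)) = p - 1) := by omega
    simp only [Function.comp_apply, beq_iff_eq, hne, if_false, Prod.mk.injEq]
    constructor <;> ring
  · have heq : ((n : Int)) = p - 1 := by omega
    simp only [Function.comp_apply, List.map_cons, List.map_nil, beq_iff_eq, heq, if_true,
      List.cons.injEq, Prod.mk.injEq]
    refine ⟨⟨?_, ?_⟩, ?_⟩ <;> first | trivial | ring
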